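-- pv_equiv track=rewrite | github.com/lanseyege/zero-knowledge-proof-work | bulletproof/bulletproof/test/pt3.py | get_vec_temp
-- ===== SOURCE A (Python) =====
-- def get_vec_temp(y,z, lens, p, p2):
--     vec_temp = []
--     _y = 1
--     _tw = 1
--     for i in range(lens):
--         vec_temp.append(z *_y + z*z * _tw)
--         _y *= y
--         #_y %= p2
--         _tw *= 2
--     return vec_temp
-- ===== SOURCE B (Python) =====
-- def get_vec_temp(y, z, lens, p, p2):
--     ys = []
--     t = 1
--     for _ in range(lens):
--         ys.append(t)
--         t *= y
--     tws = []
--     t = 1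
--     for _ in range(lens):
--         tws.append(t)
--         t *= 2
--     return [z * ys[i] + z * z * tws[i] for i in range(lens)]
-- ===== Notes on version B (the rewrite author's own statement) =====
-- stated objective: alternative
-- what changed: A interleaves everything in one incremental loop over a 3-part state; B precomputes two power tables (powers of y and of 2) in separate loops and then combines them index-wise in a final comprehension.
import Mathlib
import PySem

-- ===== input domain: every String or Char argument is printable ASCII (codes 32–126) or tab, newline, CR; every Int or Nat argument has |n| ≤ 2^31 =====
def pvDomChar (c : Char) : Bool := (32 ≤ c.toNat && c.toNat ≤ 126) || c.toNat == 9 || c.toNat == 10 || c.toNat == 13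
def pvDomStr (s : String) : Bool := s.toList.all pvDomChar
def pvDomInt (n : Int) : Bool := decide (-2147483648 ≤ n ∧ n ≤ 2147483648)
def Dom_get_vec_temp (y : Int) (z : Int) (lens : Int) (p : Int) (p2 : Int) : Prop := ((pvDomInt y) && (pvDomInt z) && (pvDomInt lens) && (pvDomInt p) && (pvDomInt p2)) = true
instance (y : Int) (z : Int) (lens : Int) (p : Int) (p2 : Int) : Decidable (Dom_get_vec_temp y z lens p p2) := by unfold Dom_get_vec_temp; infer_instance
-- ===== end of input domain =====

-- B replaces A's single incremental loop over a (list, y-power, 2-power) state by two precomputed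
-- power tables plus an index-wise combining pass (objective: alternative decomposition, same cost).


-- ===== PORT A =====
-- literal transliteration: one loop carrying (vec_temp, _y, _tw)
def get_vec_temp (y : Int) (z : Int) (lens : Int) (p : Int) (p2 : Int) : List Int :=
  ((PySem.List.pyRange 0 lens 1).foldl
    (fun (st : List Int × Int × Int) _ =>
      (st.1 ++ [z * st.2.1 + z * z * st.2.2], st.2.1 * y, st.2.2 * 2))
    ([], 1, 1)).1

-- ===== PORT B =====
-- one power-table loop: t = 1; for _ in range(lens): out.append(t); t *= base
def pvPowTable (base : Int) (lens : Int) : List Int :=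
  ((PySem.List.pyRange 0 lens 1).foldl
    (fun (st : List Int × Int) _ => (st.1 ++ [st.2], st.2 * base))
    ([], 1)).1

def get_vec_temp_alt (y : Int) (z : Int) (lens : Int) (p : Int) (p2 : Int) : List Int :=
  let ys := pvPowTable y lens
  let tws := pvPowTable 2 lens
  (PySem.List.pyRange 0 lens 1).map
    (fun i => z * PySem.List.pyGetD ys i 0 + z * z * PySem.List.pyGetD tws i 0)

-- ===== PRECONDITION & SPEC =====
def Spec_get_vec_temp (y : Int) (z : Int) (lens : Int) (p : Int) (p2 : Int) (out : List Int) : Prop := out = get_vec_temp_alt y z lens p p2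
instance (y : Int) (z : Int) (lens : Int) (p : Int) (p2 : Int) (out : List Int) : Decidable (Spec_get_vec_temp y z lens p p2 out) := by unfold Spec_get_vec_temp; infer_instance

-- ===== CLAIM (what is proved, stated in full; the proofs are below) =====
def Claim_equal_get_vec_temp : Prop := ∀ (y : Int) (z : Int) (lens : Int) (p : Int) (p2 : Int), Dom_get_vec_temp y z lens p p2 → Spec_get_vec_temp y z lens p p2 (get_vec_temp y z lens p p2)

-- ===== LEMMAS AND PROOFS =====

-- A's loop, characterised: it appends z*(a*y^i) + z*z*(b*2^i) for each i
theorem pvFoldA (y z : Int) : ∀ (n : Nat) (acc : List Int) (a b : Int),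
    (List.range n).foldl
      (fun (st : List Int × Int × Int) _ =>
        (st.1 ++ [z * st.2.1 + z * z * st.2.2], st.2.1 * y, st.2.2 * 2)) (acc, a, b)
    = (acc ++ (List.range n).map (fun i => z * (a * y ^ i) + z * z * (b * 2 ^ i)),
       a * y ^ n, b * 2 ^ n) := by
  intro n
  induction n with
  | zero => simp
  | succ n ih =>
    intro acc a b
    rw [List.range_succ, List.foldl_append, ih]
    simp [pow_succ, mul_assoc]

-- B's power loop, characterised
theorem pvFoldP (base : Int) : ∀ (n : Nat) (acc : List Int) (a : Int),
    (List.range n).foldl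
      (fun (st : List Int × Int) _ => (st.1 ++ [st.2], st.2 * base)) (acc, a)
    = (acc ++ (List.range n).map (fun i => a * base ^ i), a * base ^ n) := by
  intro n
  induction n with
  | zero => simp
  | succ n ih =>
    intro acc a
    rw [List.range_succ, List.foldl_append, ih]
    simp [pow_succ, mul_assoc]

theorem pvPowTable_eq (base lens : Int) :
    pvPowTable base lens = (List.range lens.toNat).map (fun i => base ^ i) := by
  unfold pvPowTable
  rw [PySem.List.pyRange_one]
  simp only [List.foldl_map]
  rw [pvFoldP base ((lens - 0).toNat) [] 1]
  simp

-- ===== VERDICT (by name: the statement is the Claim_ definition above) =====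
theorem get_vec_temp_spec : Claim_equal_get_vec_temp := by
  intro y z lens p p2 _
  unfold Spec_get_vec_temp get_vec_temp get_vec_temp_alt
  rw [PySem.List.pyRange_one]
  simp only [List.foldl_map, List.map_map]
  rw [pvFoldA y z ((lens - 0).toNat) [] 1 1]
  simp only [one_mul, List.nil_append, Int.sub_zero]
  apply List.ext_getElem
  · simp
  · intro i h1 h2
    simp only [List.getElem_map, List.getElem_range, Function.comp_apply, zero_add,
      pvPowTable_eq, PySem.List.pyGetD_natCast]
    have hi : i < lens.toNat := by simpa using h1
    rw [PySem.List.getD_map_range _ _ _ _ hi, PySem.List.getD_map_range _ _ _ _ hi]
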